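-- pv_equiv track=rewrite | github.com/bo-i-od/FGTest | table_configuration/hiddenTreasure/external/placement.py | _find_best_dimensions
-- ===== SOURCE A (Python) =====
-- import math
--
-- def _find_best_dimensions(area):
--     best_ratio = float('inf')
--     best_dims = (area, 1)
--     for width in range(1, int(math.sqrt(area)) + 1):
--         if area % width == 0:
--             height = area // width
--             ratio = max(width, height) / min(width, height)
--             if ratio < best_ratio:
--                 best_ratio = ratio
--                 best_dims = (min(width, height), max(width, height))
--     return best_dims
-- ===== SOURCE B (Python) =====
-- import math
--
-- def _find_best_dimensions(area):
--     # The ratio max(w,h)/min(w,h) = area/w**2 strictly decreases as the divisor w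
--     # grows, so the best pair comes from the LARGEST divisor <= sqrt(area):
--     # scan downward and return at the first divisor found.
--     for width in range(math.isqrt(area), 0, -1):
--         if area % width == 0:
--             return (width, area // width)
--     return (area, 1)
-- ===== Notes on version B (the rewrite author's own statement) =====
-- stated objective: alternative
-- what changed: Replaces the full ascending divisor scan with running-minimum float-ratio bookkeeping by a descending scan from isqrt(area) that returns at the first divisor found, since the largest divisor not exceeding the square root yields the most square-like pair.
import Mathlib
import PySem

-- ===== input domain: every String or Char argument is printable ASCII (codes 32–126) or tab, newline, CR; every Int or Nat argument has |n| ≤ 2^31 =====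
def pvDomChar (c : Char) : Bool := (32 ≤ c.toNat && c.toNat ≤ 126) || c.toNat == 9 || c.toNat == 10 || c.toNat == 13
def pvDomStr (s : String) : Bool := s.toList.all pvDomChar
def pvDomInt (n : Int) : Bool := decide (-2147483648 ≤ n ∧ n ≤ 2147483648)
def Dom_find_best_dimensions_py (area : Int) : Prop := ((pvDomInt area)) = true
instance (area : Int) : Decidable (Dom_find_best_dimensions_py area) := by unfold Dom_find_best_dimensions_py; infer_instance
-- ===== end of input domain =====

-- B scans divisors DOWNWARD from isqrt(area) and returns at the first hit (the largest
-- divisor ≤ √area gives the most square-like pair), dropping A's float-ratio running minimum.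


-- ===== PORT A =====
-- Python's 'best_ratio' is a float, 'float('inf')' initially; ported as an exact fraction
-- (numerator, denominator), with 'none' for infinity.  Exact on Dom: the candidate ratios
-- area/w² (0 < w ≤ √area ≤ 2^15.5) are pairwise separated by a relative gap ≥ 2/w ≥ 2^-15,
-- far above a double's ulp, so the float comparison '<' agrees with the exact one.
def pvStepA (area : Int) (st : Option (Int × Int) × (Int × Int)) (width : Int) :
    Option (Int × Int) × (Int × Int) :=
  if PySem.Int.mod area width = 0 then
    let height := PySem.Int.floordiv area width
    let num := max width height       -- ratio = max/min, kept exact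
    let den := min width height
    let better := match st.1 with
      | none => true
      | some (bn, bd) => decide (num * bd < bn * den)
    if better then (some (num, den), (min width height, max width height)) else st
  else st

-- int(math.sqrt(area)) ported as Nat.sqrt: exact on Dom (math.sqrt is correctly rounded and
-- for 0 ≤ area ≤ 2^31 its rounding never crosses an integer, so int(math.sqrt a) = ⌊√a⌋).
def find_best_dimensions_py (area : Int) : Int × Int :=
  ((PySem.List.pyRange 1 ((Nat.sqrt area.toNat : Int) + 1) 1).foldl (pvStepA area)
      (none, (area, 1))).2

-- ===== PORT B =====
-- 'for width in range(isqrt(area), 0, -1)' with early return: structural descent on width.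
def pvAltGo (area : Int) : Nat → Int × Int
  | 0 => (area, 1)
  | w + 1 =>
    if PySem.Int.mod area ((w + 1 : Nat) : Int) = 0 then
      (((w + 1 : Nat) : Int), PySem.Int.floordiv area ((w + 1 : Nat) : Int))
    else pvAltGo area w

def find_best_dimensions_py_alt (area : Int) : Int × Int :=
  pvAltGo area (Nat.sqrt area.toNat)

-- ===== PRECONDITION & SPEC =====
-- A raises ValueError (math.sqrt of a negative) for area < 0; excluded.
def Pre_find_best_dimensions_py (area : Int) : Prop := 0 ≤ area
instance (area : Int) : Decidable (Pre_find_best_dimensions_py area) := by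
  unfold Pre_find_best_dimensions_py; infer_instance
def pvWitness_find_best_dimensions_py : Int := 12

def Spec_find_best_dimensions_py (area : Int) (out : Int × Int) : Prop := out = find_best_dimensions_py_alt area
instance (area : Int) (out : Int × Int) : Decidable (Spec_find_best_dimensions_py area out) := by unfold Spec_find_best_dimensions_py; infer_instance

-- ===== CLAIM (what is proved, stated in full; the proofs are below) =====
def Claim_equal_find_best_dimensions_py : Prop := ∀ (area : Int), Dom_find_best_dimensions_py area → Pre_find_best_dimensions_py area → Spec_find_best_dimensions_py area (find_best_dimensions_py area)

-- ===== LEMMAS AND PROOFS =====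

-- B's descent always lands on a divisor: for 1 ≤ k, pvAltGo area k = (w, area // w) where
-- w is the largest divisor of area in [1, k].
lemma pvAltGo_spec (area : Int) (k : Nat) (hk : 1 ≤ k) :
    ∃ w : Nat, 1 ≤ w ∧ w ≤ k ∧ ((w : Int) ∣ area) ∧
      pvAltGo area k = ((w : Int), PySem.Int.floordiv area (w : Int)) ∧
      (∀ d : Nat, w < d → d ≤ k → ¬ ((d : Int) ∣ area)) := by
  induction k with
  | zero => omega
  | succ n ih =>
    by_cases hdvd : PySem.Int.mod area ((n + 1 : Nat) : Int) = 0
    · refine ⟨n + 1, by omega, le_refl _, ?_, ?_, ?_⟩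
      · exact (PySem.Int.mod_eq_zero_iff_dvd area _).mp hdvd
      · simp only [pvAltGo, hdvd, if_pos]
      · intro d hd1 hd2; omega
    · rcases Nat.eq_zero_or_pos n with hn | hn
      · exfalso; subst hn
        exact hdvd ((PySem.Int.mod_eq_zero_iff_dvd area _).mpr (by simp))
      · obtain ⟨w, hw1, hwk, hwd, heq, hmax⟩ := ih hn
        refine ⟨w, hw1, by omega, hwd, ?_, ?_⟩
        · simp only [pvAltGo, hdvd, if_neg, not_false_iff]; exact heq
        · intro d hd1 hd2
          rcases Nat.lt_or_ge d (n + 1) with h | h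
          · exact hmax d hd1 (by omega)
          · have : d = n + 1 := by omega
            subst this
            exact fun hc => hdvd ((PySem.Int.mod_eq_zero_iff_dvd area _).mpr hc)

-- The ascending fold of A over 1..k carries exactly the pair B's descent from k produces.
lemma pvFold_inv (area : Int) (ha : 1 ≤ area) (k : Nat) (hk1 : 1 ≤ k)
    (hk : k ≤ Nat.sqrt area.toNat) :
    (PySem.List.pyRange 1 ((k : Int) + 1) 1).foldl (pvStepA area) (none, (area, 1)) =
      (some ((pvAltGo area k).2, (pvAltGo area k).1), pvAltGo area k) := by
  induction k with
  | zero => omega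
  | succ n ih =>
    rcases Nat.eq_zero_or_pos n with hn | hn
    · subst hn
      have h1 : PySem.Int.mod area 1 = 0 :=
        (PySem.Int.mod_eq_zero_iff_dvd area 1).mpr (one_dvd _)
      have hd1 : PySem.Int.floordiv area 1 = area := by
        rw [PySem.Int.floordiv_eq_ediv_of_pos one_pos, Int.ediv_one]
      have hrange : PySem.List.pyRange 1 (((1 : Nat) : Int) + 1) 1 = [1] := by decide
      have hg : pvAltGo area 1 = (1, area) := by
        show (if PySem.Int.mod area ((0 + 1 : Nat) : Int) = 0 then _ else _) = _
        rw [if_pos (by push_cast; exact h1)]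
        push_cast [hd1]
        rfl
      rw [hrange, hg]
      simp [List.foldl_cons, List.foldl_nil, pvStepA,
        max_eq_right ha, min_eq_left ha]
    · -- inductive step: width n+1 appended on the right
      have hkr : (n : Nat) ≤ Nat.sqrt area.toNat := by omega
      have hsq : ((n : Int) + 1) * ((n : Int) + 1) ≤ area := by
        have h1 : (n + 1) * (n + 1) ≤ area.toNat := Nat.le_sqrt.mp hk
        calc ((n : Int) + 1) * ((n : Int) + 1) = (((n + 1) * (n + 1) : Nat) : Int) := by
              push_cast; ring
          _ ≤ (area.toNat : Int) := by exact_mod_cast h1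
          _ = area := Int.toNat_of_nonneg (by omega)
      have hrange : PySem.List.pyRange 1 (((n + 1 : Nat) : Int) + 1) 1 =
          PySem.List.pyRange 1 ((n : Int) + 1) 1 ++ [(n : Int) + 1] := by
        have := PySem.List.pyRange_one_succ_right (a := 1) (b := (n : Int) + 1) (by omega)
        push_cast
        exact this
      obtain ⟨w, hw1, hwk, hwd, heq, hmaxd⟩ := pvAltGo_spec area n hn
      have hwpos : (0 : Int) < (w : Int) := by exact_mod_cast hw1
      have hold : PySem.Int.floordiv area (w : Int) = area / (w : Int) :=
        PySem.Int.floordiv_eq_ediv_of_pos hwpos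
      have holdmul : (w : Int) * (area / (w : Int)) = area := Int.mul_ediv_cancel' hwd
      rw [hrange, List.foldl_append, ih hn hkr, heq]
      by_cases hdvd : PySem.Int.mod area ((n : Int) + 1) = 0
      · have hdvd' : ((n : Int) + 1) ∣ area :=
          (PySem.Int.mod_eq_zero_iff_dvd area ((n : Int) + 1)).mp hdvd
        have hnew : PySem.Int.floordiv area ((n : Int) + 1) = area / ((n : Int) + 1) :=
          PySem.Int.floordiv_eq_ediv_of_pos (by omega)
        have hnewmul : ((n : Int) + 1) * (area / ((n : Int) + 1)) = area :=
          Int.mul_ediv_cancel' hdvd'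
        -- width ≤ height at width = n+1 because (n+1)² ≤ area
        have hle : (n : Int) + 1 ≤ area / ((n : Int) + 1) := by nlinarith
        have hOldpos : (0 : Int) < area / (w : Int) := by nlinarith
        have hwlt : (w : Int) < (n : Int) + 1 := by exact_mod_cast Nat.lt_succ_of_le hwk
        -- the new exact ratio beats the stored one strictly, since w < n+1
        have hbetter : max ((n : Int) + 1) (area / ((n : Int) + 1)) * (w : Int) <
            PySem.Int.floordiv area (w : Int) *
              min ((n : Int) + 1) (area / ((n : Int) + 1)) := by
          rw [max_eq_right hle, min_eq_left hle, hold]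
          nlinarith
        have haltgo : pvAltGo area (n + 1) =
            (((n : Int) + 1), PySem.Int.floordiv area ((n : Int) + 1)) := by
          show (if PySem.Int.mod area ((n + 1 : Nat) : Int) = 0 then _ else _) = _
          rw [if_pos (by push_cast; exact hdvd)]
          push_cast
          rfl
        rw [haltgo]
        simp only [List.foldl_cons, List.foldl_nil, pvStepA, hdvd, if_pos]
        rw [hnew, if_pos (decide_eq_true hbetter), max_eq_right hle, min_eq_left hle]
      · have haltgo : pvAltGo area (n + 1) = pvAltGo area n := by
          show (if PySem.Int.mod area ((n + 1 : Nat) : Int) = 0 then _ else _) = _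
          rw [if_neg (by push_cast; exact hdvd)]
        have hdvd2 : ¬ ((n : Int) + 1 ∣ area) := fun hc =>
          hdvd ((PySem.Int.mod_eq_zero_iff_dvd area ((n : Int) + 1)).mpr hc)
        rw [haltgo, heq]
        simp [pvStepA, hdvd2]

-- ===== VERDICT (by name: the statement is the Claim_ definition above) =====
theorem find_best_dimensions_py_spec : Claim_equal_find_best_dimensions_py := by
  intro area _ hpre
  unfold Pre_find_best_dimensions_py at hpre
  unfold Spec_find_best_dimensions_py
  rcases lt_or_ge area 1 with h0 | h1
  · have : area = 0 := by omega
    subst this; decide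
  · have hr : 1 ≤ Nat.sqrt area.toNat := Nat.sqrt_pos.mpr (by omega)
    unfold find_best_dimensions_py find_best_dimensions_py_alt
    rw [pvFold_inv area h1 _ hr (le_refl _)]
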